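-- pv_equiv track=rewrite | github.com/ilitteri/6107-MatematicaDiscreta | codigos/relaciones_de_orden.py | infimos
-- ===== SOURCE A (Python) =====
-- def contenido(b, a):
--     contained = True
--     for i in b:
--         contained &= i in a
--     return contained
--
-- def cota_inferior(b, a):
--     cota_inf = []
--     if contenido(b, a):
--         for c in a:
--             cota = True
--             for x in b:
--                 cota &= x % c == 0
--             if cota:
--                 cota_inf.append(c)
--     return cota_inf
--
-- def infimos(b, a):
--     infimos = []
--     if contenido(b, a):
--         cota_inf = cota_inferior(b, a)
--         for i in cota_inf:
--             inf = True
--             for c in cota_inf: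
--                 inf &= i % c == 0
--             if inf:
--                 infimos.append(i)
--     return infimos
-- ===== SOURCE B (Python) =====
-- def _gcd(x, y):
--     x, y = abs(x), abs(y)
--     while y:
--         x, y = y, x % y
--     return x
--
-- def _lcm(x, y):
--     return abs(x * y) // _gcd(x, y)
--
-- def infimos(b, a):
--     s = set(a)
--     if not all(x in s for x in b):
--         return []
--     lows = [c for c in a if all(x % c == 0 for x in b)]
--     g = 1
--     for c in lows:
--         g = _lcm(g, c)
--     return [i for i in lows if i % g == 0]
-- ===== Notes on version B (the rewrite author's own statement) =====
-- stated objective: faster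
-- what changed: B replaces A's quadratic all-pairs divisibility scan over the lower-bound list (and A's list-membership containment test and recomputation of the containment check) with a set for membership and a single lcm accumulator: an element is divisible by every lower bound iff it is divisible by their lcm, so one fold plus one filter pass suffices.
import Mathlib
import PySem

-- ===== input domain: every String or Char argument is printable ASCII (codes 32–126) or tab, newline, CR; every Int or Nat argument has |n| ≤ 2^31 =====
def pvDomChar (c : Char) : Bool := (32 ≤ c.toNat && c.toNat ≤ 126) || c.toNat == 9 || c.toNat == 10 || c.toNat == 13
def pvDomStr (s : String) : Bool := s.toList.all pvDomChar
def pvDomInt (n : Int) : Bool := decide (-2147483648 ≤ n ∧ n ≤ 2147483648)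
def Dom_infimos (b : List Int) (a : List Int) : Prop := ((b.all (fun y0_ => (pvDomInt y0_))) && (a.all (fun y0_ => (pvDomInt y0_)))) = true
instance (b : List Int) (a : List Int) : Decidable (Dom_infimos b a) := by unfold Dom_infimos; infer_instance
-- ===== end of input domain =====

-- B replaces A's quadratic all-pairs divisibility scan over the lower bounds by a single
-- lcm accumulator and one filter pass (objective: faster).

-- ===== PORT A =====
def contenido (b a : List Int) : Bool :=
  b.foldl (fun contained i => contained && a.contains i) true

def cota_inferior (b a : List Int) : List Int :=
  if contenido b a then
    a.foldl (fun acc c =>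
      if b.foldl (fun cota x => cota && (PySem.Int.mod x c == 0)) true
      then acc ++ [c] else acc) []
  else []

def infimos (b : List Int) (a : List Int) : List Int :=
  if contenido b a then
    let cota_inf := cota_inferior b a
    cota_inf.foldl (fun acc i =>
      if cota_inf.foldl (fun inf c => inf && (PySem.Int.mod i c == 0)) true
      then acc ++ [i] else acc) []
  else []

-- ===== PORT B =====
-- _gcd(x, y): x, y = abs(x), abs(y); while y: x, y = y, x % y; return x
def gcdLoop (x y : Int) : Int :=
  if h : y = 0 then x else gcdLoop y (PySem.Int.mod x y)
termination_by y.natAbs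
decreasing_by
  rcases lt_or_gt_of_ne h with hy | hy
  · have h1 := PySem.Int.mod_neg_bounds x hy
    omega
  · have h1 := PySem.Int.mod_nonneg x hy
    have h2 := PySem.Int.mod_lt x hy
    omega

def pyGcd (x y : Int) : Int := gcdLoop |x| |y|

-- _lcm(x, y): abs(x * y) // _gcd(x, y)
def pyLcm (x y : Int) : Int := PySem.Int.floordiv |x * y| (pyGcd x y)

def infimos_alt (b : List Int) (a : List Int) : List Int :=
  let s := PySem.Set.ofList a
  if b.all (fun x => PySem.Set.contains s x) then
    let lows := a.filter (fun c => b.all (fun x => PySem.Int.mod x c == 0))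
    let g := lows.foldl (fun g c => pyLcm g c) 1
    lows.filter (fun i => PySem.Int.mod i g == 0)
  else []

-- ===== PRECONDITION & SPEC =====
-- Pre_ excludes exactly the inputs on which A raises ZeroDivisionError:
-- when every element of b occurs in a and 0 ∈ a, A computes x % 0.
def Pre_infimos (b : List Int) (a : List Int) : Prop :=
  (∀ x ∈ b, x ∈ a) → (0 : Int) ∉ a
instance (b : List Int) (a : List Int) : Decidable (Pre_infimos b a) := by
  unfold Pre_infimos; infer_instance

def pvWitness_infimos : List Int × List Int := ([2, 4], [1, 2, 4, 8])

def Spec_infimos (b : List Int) (a : List Int) (out : List Int) : Prop := out = infimos_alt b a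
instance (b : List Int) (a : List Int) (out : List Int) : Decidable (Spec_infimos b a out) := by unfold Spec_infimos; infer_instance

-- ===== CLAIM (what is proved, stated in full; the proofs are below) =====
def Claim_equal_infimos : Prop := ∀ (b : List Int) (a : List Int), Dom_infimos b a → Pre_infimos b a → Spec_infimos b a (infimos b a)

-- ===== LEMMAS AND PROOFS =====

theorem foldl_and_eq_all {α : Type} (f : α → Bool) :
    ∀ (l : List α) (c : Bool), l.foldl (fun r x => r && f x) c = (c && l.all f) := by
  intro l
  induction l with
  | nil => intro c; simp
  | cons x xs ih => intro c; simp [List.foldl_cons, ih, Bool.and_assoc]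

theorem contenido_eq_all (b a : List Int) :
    contenido b a = b.all (fun x => a.contains x) := by
  simp [contenido, foldl_and_eq_all]

theorem gcdLoop_cast : ∀ (n m : Nat), gcdLoop (m : Int) (n : Int) = (Nat.gcd m n : Int) := by
  intro n
  induction n using Nat.strong_induction_on with
  | _ n ih =>
    intro m
    by_cases h0 : n = 0
    · subst h0
      rw [gcdLoop]
      simp
    · rw [gcdLoop]
      have hne : (n : Int) ≠ 0 := by exact_mod_cast h0
      simp only [hne, dite_false]
      rw [PySem.Int.mod_natCast m n]
      rw [ih (m % n) (Nat.mod_lt m (Nat.pos_of_ne_zero h0))]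
      congr 1
      rw [Nat.gcd_comm n (m % n), ← Nat.gcd_rec n m, Nat.gcd_comm]

theorem pyGcd_eq (x y : Int) : pyGcd x y = (Int.gcd x y : Int) := by
  unfold pyGcd
  rw [Int.abs_eq_natAbs, Int.abs_eq_natAbs, gcdLoop_cast]
  rfl

theorem pyLcm_eq (x y : Int) : pyLcm x y = (Int.lcm x y : Int) := by
  unfold pyLcm
  rw [pyGcd_eq, Int.abs_eq_natAbs, Int.natAbs_mul]
  rw [PySem.Int.floordiv_natCast]
  rfl

theorem pyLcm_ne_zero (x y : Int) (hx : x ≠ 0) (hy : y ≠ 0) : pyLcm x y ≠ 0 := by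
  rw [pyLcm_eq x y]
  have h : Int.lcm x y ≠ 0 := by
    rw [Int.lcm_def]
    exact Nat.lcm_ne_zero (by simpa using hx) (by simpa using hy)
  exact_mod_cast h

theorem foldl_lcm_dvd (l : List Int) (hl : ∀ c ∈ l, c ≠ 0) :
    ∀ g : Int, g ≠ 0 →
      (l.foldl (fun g c => pyLcm g c) g ≠ 0 ∧
       ∀ i : Int, (l.foldl (fun g c => pyLcm g c) g ∣ i ↔ (g ∣ i ∧ ∀ c ∈ l, c ∣ i))) := by
  induction l with
  | nil => intro g hg; simp [hg]
  | cons c cs ih =>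
    intro g hg
    have hc : c ≠ 0 := hl c (by simp)
    have hcs : ∀ x ∈ cs, x ≠ 0 := fun x hx => hl x (List.mem_cons_of_mem c hx)
    have hlcm : pyLcm g c ≠ 0 := pyLcm_ne_zero g c hg hc
    obtain ⟨h1, h2⟩ := ih hcs (pyLcm g c) hlcm
    refine ⟨h1, fun i => ?_⟩
    rw [List.foldl_cons, h2 i]
    constructor
    · rintro ⟨hd, hrest⟩
      rw [pyLcm_eq g c] at hd
      exact ⟨dvd_trans (Int.coe_lcm_dvd_iff.mp dvd_rfl).1 hd,
        fun x hx => (List.mem_cons.mp hx).elim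
          (fun h => h ▸ dvd_trans (Int.coe_lcm_dvd_iff.mp dvd_rfl).2 hd) (hrest x)⟩
    · rintro ⟨hgd, hall⟩
      refine ⟨?_, fun x hx => hall x (List.mem_cons_of_mem c hx)⟩
      rw [pyLcm_eq g c]
      exact Int.coe_lcm_dvd hgd (hall c (by simp))

theorem set_contains_ofList (a : List Int) (x : Int) :
    PySem.Set.contains (PySem.Set.ofList a) x = a.contains x := by
  simp [PySem.Set.contains, PySem.Set.mem_ofList]

-- ===== VERDICT (by name: the statement is the Claim_ definition above) =====
theorem infimos_spec : Claim_equal_infimos := by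
  unfold Claim_equal_infimos
  intro b a _ hpre
  unfold Spec_infimos
  unfold infimos infimos_alt
  simp only [set_contains_ofList]
  rw [show (b.all fun x => a.contains x) = contenido b a from (contenido_eq_all b a).symm]
  by_cases hcont : contenido b a = true
  · simp only [hcont, if_true]
    -- every element of b is in a, hence 0 ∉ a
    have hsub : ∀ x ∈ b, x ∈ a := by
      rw [contenido_eq_all] at hcont
      simp only [List.all_eq_true] at hcont
      intro x hx
      simpa using hcont x hx
    have h0a : (0 : Int) ∉ a := hpre hsub
    -- A's list of lower bounds is the same filter B builds
    have hcota : cota_inferior b a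
        = a.filter (fun c => b.all (fun x => PySem.Int.mod x c == 0)) := by
      unfold cota_inferior
      simp only [hcont, if_true, foldl_and_eq_all, Bool.true_and,
        PySem.List.foldl_append_if_eq_filter, List.nil_append]
    rw [hcota]
    set L := a.filter (fun c => b.all (fun x => PySem.Int.mod x c == 0)) with hL
    have h0L : ∀ c ∈ L, c ≠ 0 := by
      intro c hc
      have : c ∈ a := List.mem_of_mem_filter hc
      intro h; exact h0a (h ▸ this)
    obtain ⟨hg0, hgdvd⟩ := foldl_lcm_dvd L h0L 1 one_ne_zero
    simp only [foldl_and_eq_all, Bool.true_and, PySem.List.foldl_append_if_eq_filter,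
      List.nil_append]
    apply List.filter_congr
    intro i _
    rw [Bool.eq_iff_iff]
    simp only [List.all_eq_true, beq_iff_eq, PySem.Int.mod_eq_zero_iff_dvd]
    rw [hgdvd i]
    simp
  · simp only [Bool.not_eq_true] at hcont
    simp [hcont]
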